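-- pv_equiv track=rewrite | github.com/MIKI0001/Subverse-Save-Editor | main.py | get_unlocked_characters
-- ===== SOURCE A (Python) =====
-- from typing import Dict, List, Tuple, Optional, Any
--
-- CHARACTERS = [
--     "DEMI", "Lily", "Kili", "Ela", "Taron",
--     "Sova", "Fortune", "Huntress", "Blythe", "Fow-Chan"
-- ]
--
-- PROPERTY_KEYWORDS = ["Level", "CurrentXP", "BlueBallsXP", "UnspentPP", "CurrentDevotion", "DevotionLevel"]
--
-- def get_unlocked_characters(properties: List[Dict[str, Any]]) -> Dict[str, bool]:
--     """Determine which characters are unlocked based on property counts."""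
--     character_property_counts = {char: 0 for char in CHARACTERS}
--     keyword_occurrence_counters = {key: 0 for key in PROPERTY_KEYWORDS}
--
--     for prop in properties:
--         prop_name_parts = prop['name'].split('_')
--         for key in PROPERTY_KEYWORDS:
--             if prop_name_parts[0] in key:
--                 index = keyword_occurrence_counters[key]
--                 if index < len(CHARACTERS):
--                     character_property_counts[CHARACTERS[index]] += 1
--                     keyword_occurrence_counters[key] += 1
--                 break
--
--     return {
--         char: (character_property_counts[char] >= len(PROPERTY_KEYWORDS))
--         for char in CHARACTERS
--     }
-- ===== SOURCE B (Python) =====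
-- from typing import Dict, List, Any
--
-- CHARACTERS = [
--     "DEMI", "Lily", "Kili", "Ela", "Taron",
--     "Sova", "Fortune", "Huntress", "Blythe", "Fow-Chan"
-- ]
--
-- PROPERTY_KEYWORDS = ["Level", "CurrentXP", "BlueBallsXP", "UnspentPP", "CurrentDevotion", "DevotionLevel"]
--
-- def get_unlocked_characters(properties: List[Dict[str, Any]]) -> Dict[str, bool]:
--     """Tally matches per keyword, then unlock the first min(tallies) characters."""
--     tallies = {key: 0 for key in PROPERTY_KEYWORDS}
--     for prop in properties:
--         first = prop['name'].split('_')[0]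
--         for key in PROPERTY_KEYWORDS:
--             if first in key:
--                 tallies[key] += 1
--                 break
--     m = min(tallies.values())
--     return {char: i < m for i, char in enumerate(CHARACTERS)}
-- ===== Notes on version B (the rewrite author's own statement) =====
-- stated objective: simpler
-- what changed: Instead of threading a per-keyword occurrence index that assigns each matching property to the next character's count dict, B tallies matches per keyword in one dict and unlocks exactly the first min(tallies) characters, since a character is unlocked iff every keyword's tally exceeds its index.
import Mathlib
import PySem

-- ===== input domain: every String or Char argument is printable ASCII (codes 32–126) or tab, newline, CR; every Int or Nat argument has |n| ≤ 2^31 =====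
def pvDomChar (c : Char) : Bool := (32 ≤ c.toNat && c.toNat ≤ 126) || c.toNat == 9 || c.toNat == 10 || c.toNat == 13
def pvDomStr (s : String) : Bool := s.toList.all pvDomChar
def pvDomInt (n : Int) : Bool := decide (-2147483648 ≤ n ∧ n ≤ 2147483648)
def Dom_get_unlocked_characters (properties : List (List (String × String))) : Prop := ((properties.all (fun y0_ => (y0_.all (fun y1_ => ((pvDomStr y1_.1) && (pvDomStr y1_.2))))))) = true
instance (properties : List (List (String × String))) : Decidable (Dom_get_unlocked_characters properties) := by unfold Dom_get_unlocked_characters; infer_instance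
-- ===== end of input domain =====

-- B replaces A's per-character occurrence-index bookkeeping (two dicts) by a single per-keyword
-- tally followed by a minimum threshold: character i is unlocked iff i < min(tallies); same
-- return value, a different decomposition (objective: simpler).

-- ===== PORT A =====
def pvCHARACTERS : List String := ["DEMI", "Lily", "Kili", "Ela", "Taron", "Sova", "Fortune", "Huntress", "Blythe", "Fow-Chan"]

def pvKEYWORDS : List String := ["Level", "CurrentXP", "BlueBallsXP", "UnspentPP", "CurrentDevotion", "DevotionLevel"]

-- prop['name'].split('_')[0]; identical expression in A and B (the source line is the same in both).
-- Under Pre_ the 'name' key is present and split('_') is never empty, so the getD defaults are unreachable.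
def pvFirstOf (prop : List (String × String)) : String :=
  (PySem.List.pyGet? ((PySem.Str.split? (((PySem.Dict.mk prop).get? "name").getD "") "_").getD []) 0).getD ""

-- A's inner 'for key in PROPERTY_KEYWORDS: … break' loop; both of A's dicts always hold all
-- their keys (initialised below), so the getD/modify defaults 0 are unreachable.
def pvAInner (first : String) (counts counters : PySem.Dict String Int) :
    List String → PySem.Dict String Int × PySem.Dict String Int
  | [] => (counts, counters)
  | key :: rest =>
    if PySem.Str.isIn first key then
      let index := counters.getD key 0
      if index < (pvCHARACTERS.length : Int) then
        (counts.modify ((PySem.List.pyGet? pvCHARACTERS index).getD "") 0 (· + 1),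
         counters.modify key 0 (· + 1))
      else (counts, counters)
    else pvAInner first counts counters rest

def get_unlocked_characters (properties : List (List (String × String))) : List (String × Bool) :=
  let st := properties.foldl
    (fun st prop => pvAInner (pvFirstOf prop) st.1 st.2 pvKEYWORDS)
    (PySem.Dict.mk (pvCHARACTERS.map (fun c => (c, (0 : Int)))),
     PySem.Dict.mk (pvKEYWORDS.map (fun k => (k, (0 : Int)))))
  pvCHARACTERS.map (fun c => (c, decide (st.1.getD c 0 ≥ (pvKEYWORDS.length : Int))))

-- ===== PORT B =====
-- B's inner loop: bump the tally of the first keyword containing `first`, then break.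
def pvBInner (first : String) (tallies : PySem.Dict String Int) : List String → PySem.Dict String Int
  | [] => tallies
  | key :: rest =>
    if PySem.Str.isIn first key then tallies.modify key 0 (· + 1)
    else pvBInner first tallies rest

def get_unlocked_characters_alt (properties : List (List (String × String))) : List (String × Bool) :=
  let tallies := properties.foldl
    (fun tallies prop => pvBInner (pvFirstOf prop) tallies pvKEYWORDS)
    (PySem.Dict.mk (pvKEYWORDS.map (fun k => (k, (0 : Int)))))
  let m := (PySem.List.min? tallies.values (fun x => x)).getD 0   -- tallies has its 6 keys: values ≠ [], getD unreachable
  (PySem.List.enumerate pvCHARACTERS 0).map (fun p => (p.2, decide (p.1 < m)))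

-- ===== PRECONDITION & SPEC =====
-- Pre_ excludes exactly the inputs on which the Python raises KeyError: a property dict without a 'name' key.
def Pre_get_unlocked_characters (properties : List (List (String × String))) : Prop :=
  ∀ prop ∈ properties, (PySem.Dict.mk prop).contains "name" = true
instance (properties : List (List (String × String))) : Decidable (Pre_get_unlocked_characters properties) := by unfold Pre_get_unlocked_characters; infer_instance

def pvWitness_get_unlocked_characters : (List (List (String × String))) := [[("name", "Level_0")], [("name", "CurrentXP")]]

def Spec_get_unlocked_characters (properties : List (List (String × String))) (out : List (String × Bool)) : Prop := out = get_unlocked_characters_alt properties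
instance (properties : List (List (String × String))) (out : List (String × Bool)) : Decidable (Spec_get_unlocked_characters properties out) := by unfold Spec_get_unlocked_characters; infer_instance

-- ===== CLAIM (what is proved, stated in full; the proofs are below) =====
def Claim_equal_get_unlocked_characters : Prop := ∀ (properties : List (List (String × String))), Dom_get_unlocked_characters properties → Pre_get_unlocked_characters properties → Spec_get_unlocked_characters properties (get_unlocked_characters properties)

-- ===== LEMMAS AND PROOFS =====

-- Abstract state: six tallies t0..t5, one per keyword (in PROPERTY_KEYWORDS order).
-- pvInd i t = 1 iff A's capped counter for a keyword with raw tally t has passed character i;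
-- pvCnt i = A's property count for character i; pvC/pvK are A's two dicts, pvB is B's tally dict.
def pvInd (i t : Int) : Int := if i < min t 10 then 1 else 0

def pvCnt (i : Int) (t0 t1 t2 t3 t4 t5 : Int) : Int := pvInd i t0 + pvInd i t1 + pvInd i t2 + pvInd i t3 + pvInd i t4 + pvInd i t5

def pvC (t0 t1 t2 t3 t4 t5 : Int) : PySem.Dict String Int :=
  PySem.Dict.mk [("DEMI", pvCnt 0 t0 t1 t2 t3 t4 t5), ("Lily", pvCnt 1 t0 t1 t2 t3 t4 t5), ("Kili", pvCnt 2 t0 t1 t2 t3 t4 t5), ("Ela", pvCnt 3 t0 t1 t2 t3 t4 t5), ("Taron", pvCnt 4 t0 t1 t2 t3 t4 t5), ("Sova", pvCnt 5 t0 t1 t2 t3 t4 t5), ("Fortune", pvCnt 6 t0 t1 t2 t3 t4 t5), ("Huntress", pvCnt 7 t0 t1 t2 t3 t4 t5), ("Blythe", pvCnt 8 t0 t1 t2 t3 t4 t5), ("Fow-Chan", pvCnt 9 t0 t1 t2 t3 t4 t5)]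

def pvK (t0 t1 t2 t3 t4 t5 : Int) : PySem.Dict String Int :=
  PySem.Dict.mk [("Level", min t0 10), ("CurrentXP", min t1 10), ("BlueBallsXP", min t2 10), ("UnspentPP", min t3 10), ("CurrentDevotion", min t4 10), ("DevotionLevel", min t5 10)]

def pvB (t0 t1 t2 t3 t4 t5 : Int) : PySem.Dict String Int :=
  PySem.Dict.mk [("Level", t0), ("CurrentXP", t1), ("BlueBallsXP", t2), ("UnspentPP", t3), ("CurrentDevotion", t4), ("DevotionLevel", t5)]

lemma pvCharsLen : (pvCHARACTERS.length : Int) = 10 := by norm_num [pvCHARACTERS]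

lemma pvKeysLen : (pvKEYWORDS.length : Int) = 6 := by norm_num [pvKEYWORDS]

lemma pvInd_succ (t : Int) (h : t < 10) (i : Int) :
    pvInd i (t + 1) = pvInd i t + (if t = i then 1 else 0) := by
  unfold pvInd; split_ifs <;> omega

lemma pvKeyG0 : (PySem.List.pyGet? pvCHARACTERS (0 : Int)).getD "" = "DEMI" := by decide

lemma pvKeyG1 : (PySem.List.pyGet? pvCHARACTERS (1 : Int)).getD "" = "Lily" := by decide

lemma pvKeyG2 : (PySem.List.pyGet? pvCHARACTERS (2 : Int)).getD "" = "Kili" := by decide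

lemma pvKeyG3 : (PySem.List.pyGet? pvCHARACTERS (3 : Int)).getD "" = "Ela" := by decide

lemma pvKeyG4 : (PySem.List.pyGet? pvCHARACTERS (4 : Int)).getD "" = "Taron" := by decide

lemma pvKeyG5 : (PySem.List.pyGet? pvCHARACTERS (5 : Int)).getD "" = "Sova" := by decide

lemma pvKeyG6 : (PySem.List.pyGet? pvCHARACTERS (6 : Int)).getD "" = "Fortune" := by decide

lemma pvKeyG7 : (PySem.List.pyGet? pvCHARACTERS (7 : Int)).getD "" = "Huntress" := by decide

lemma pvKeyG8 : (PySem.List.pyGet? pvCHARACTERS (8 : Int)).getD "" = "Blythe" := by decide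

lemma pvKeyG9 : (PySem.List.pyGet? pvCHARACTERS (9 : Int)).getD "" = "Fow-Chan" := by decide


lemma pvKget0 (t0 t1 t2 t3 t4 t5 : Int) : (pvK t0 t1 t2 t3 t4 t5).getD "Level" 0 = min t0 10 := by
  simp [pvK, PySem.Dict.getD_eq_get?_getD, PySem.Dict.get?_mk_cons]

lemma pvKget1 (t0 t1 t2 t3 t4 t5 : Int) : (pvK t0 t1 t2 t3 t4 t5).getD "CurrentXP" 0 = min t1 10 := by
  simp [pvK, PySem.Dict.getD_eq_get?_getD, PySem.Dict.get?_mk_cons]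

lemma pvKget2 (t0 t1 t2 t3 t4 t5 : Int) : (pvK t0 t1 t2 t3 t4 t5).getD "BlueBallsXP" 0 = min t2 10 := by
  simp [pvK, PySem.Dict.getD_eq_get?_getD, PySem.Dict.get?_mk_cons]

lemma pvKget3 (t0 t1 t2 t3 t4 t5 : Int) : (pvK t0 t1 t2 t3 t4 t5).getD "UnspentPP" 0 = min t3 10 := by
  simp [pvK, PySem.Dict.getD_eq_get?_getD, PySem.Dict.get?_mk_cons]

lemma pvKget4 (t0 t1 t2 t3 t4 t5 : Int) : (pvK t0 t1 t2 t3 t4 t5).getD "CurrentDevotion" 0 = min t4 10 := by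
  simp [pvK, PySem.Dict.getD_eq_get?_getD, PySem.Dict.get?_mk_cons]

lemma pvKget5 (t0 t1 t2 t3 t4 t5 : Int) : (pvK t0 t1 t2 t3 t4 t5).getD "DevotionLevel" 0 = min t5 10 := by
  simp [pvK, PySem.Dict.getD_eq_get?_getD, PySem.Dict.get?_mk_cons]

lemma pvDmod (v : Int) (h0 : 0 ≤ v) (h10 : v < 10) (a0 a1 a2 a3 a4 a5 a6 a7 a8 a9 : Int) :
    (PySem.Dict.mk [("DEMI", a0), ("Lily", a1), ("Kili", a2), ("Ela", a3), ("Taron", a4), ("Sova", a5), ("Fortune", a6), ("Huntress", a7), ("Blythe", a8), ("Fow-Chan", a9)]).modify ((PySem.List.pyGet? pvCHARACTERS v).getD "") 0 (· + 1)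
      = PySem.Dict.mk [("DEMI", a0 + (if v = 0 then 1 else 0)), ("Lily", a1 + (if v = 1 then 1 else 0)), ("Kili", a2 + (if v = 2 then 1 else 0)), ("Ela", a3 + (if v = 3 then 1 else 0)), ("Taron", a4 + (if v = 4 then 1 else 0)), ("Sova", a5 + (if v = 5 then 1 else 0)), ("Fortune", a6 + (if v = 6 then 1 else 0)), ("Huntress", a7 + (if v = 7 then 1 else 0)), ("Blythe", a8 + (if v = 8 then 1 else 0)), ("Fow-Chan", a9 + (if v = 9 then 1 else 0))] := by
  interval_cases v <;>
    (apply PySem.Dict.ext;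
     simp [pvKeyG0, pvKeyG1, pvKeyG2, pvKeyG3, pvKeyG4, pvKeyG5, pvKeyG6, pvKeyG7, pvKeyG8, pvKeyG9, PySem.Dict.modify, PySem.Dict.items_insert, PySem.Dict.getD_eq_get?_getD, PySem.Dict.get?_mk_cons])

lemma pvDmodK0 (b0 b1 b2 b3 b4 b5 : Int) :
    (PySem.Dict.mk [("Level", b0), ("CurrentXP", b1), ("BlueBallsXP", b2), ("UnspentPP", b3), ("CurrentDevotion", b4), ("DevotionLevel", b5)]).modify "Level" 0 (· + 1) = PySem.Dict.mk [("Level", b0 + 1), ("CurrentXP", b1), ("BlueBallsXP", b2), ("UnspentPP", b3), ("CurrentDevotion", b4), ("DevotionLevel", b5)] := by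
  apply PySem.Dict.ext
  simp [PySem.Dict.modify, PySem.Dict.items_insert, PySem.Dict.getD_eq_get?_getD, PySem.Dict.get?_mk_cons]

lemma pvDmodK1 (b0 b1 b2 b3 b4 b5 : Int) :
    (PySem.Dict.mk [("Level", b0), ("CurrentXP", b1), ("BlueBallsXP", b2), ("UnspentPP", b3), ("CurrentDevotion", b4), ("DevotionLevel", b5)]).modify "CurrentXP" 0 (· + 1) = PySem.Dict.mk [("Level", b0), ("CurrentXP", b1 + 1), ("BlueBallsXP", b2), ("UnspentPP", b3), ("CurrentDevotion", b4), ("DevotionLevel", b5)] := by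
  apply PySem.Dict.ext
  simp [PySem.Dict.modify, PySem.Dict.items_insert, PySem.Dict.getD_eq_get?_getD, PySem.Dict.get?_mk_cons]

lemma pvDmodK2 (b0 b1 b2 b3 b4 b5 : Int) :
    (PySem.Dict.mk [("Level", b0), ("CurrentXP", b1), ("BlueBallsXP", b2), ("UnspentPP", b3), ("CurrentDevotion", b4), ("DevotionLevel", b5)]).modify "BlueBallsXP" 0 (· + 1) = PySem.Dict.mk [("Level", b0), ("CurrentXP", b1), ("BlueBallsXP", b2 + 1), ("UnspentPP", b3), ("CurrentDevotion", b4), ("DevotionLevel", b5)] := by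
  apply PySem.Dict.ext
  simp [PySem.Dict.modify, PySem.Dict.items_insert, PySem.Dict.getD_eq_get?_getD, PySem.Dict.get?_mk_cons]

lemma pvDmodK3 (b0 b1 b2 b3 b4 b5 : Int) :
    (PySem.Dict.mk [("Level", b0), ("CurrentXP", b1), ("BlueBallsXP", b2), ("UnspentPP", b3), ("CurrentDevotion", b4), ("DevotionLevel", b5)]).modify "UnspentPP" 0 (· + 1) = PySem.Dict.mk [("Level", b0), ("CurrentXP", b1), ("BlueBallsXP", b2), ("UnspentPP", b3 + 1), ("CurrentDevotion", b4), ("DevotionLevel", b5)] := by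
  apply PySem.Dict.ext
  simp [PySem.Dict.modify, PySem.Dict.items_insert, PySem.Dict.getD_eq_get?_getD, PySem.Dict.get?_mk_cons]

lemma pvDmodK4 (b0 b1 b2 b3 b4 b5 : Int) :
    (PySem.Dict.mk [("Level", b0), ("CurrentXP", b1), ("BlueBallsXP", b2), ("UnspentPP", b3), ("CurrentDevotion", b4), ("DevotionLevel", b5)]).modify "CurrentDevotion" 0 (· + 1) = PySem.Dict.mk [("Level", b0), ("CurrentXP", b1), ("BlueBallsXP", b2), ("UnspentPP", b3), ("CurrentDevotion", b4 + 1), ("DevotionLevel", b5)] := by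
  apply PySem.Dict.ext
  simp [PySem.Dict.modify, PySem.Dict.items_insert, PySem.Dict.getD_eq_get?_getD, PySem.Dict.get?_mk_cons]

lemma pvDmodK5 (b0 b1 b2 b3 b4 b5 : Int) :
    (PySem.Dict.mk [("Level", b0), ("CurrentXP", b1), ("BlueBallsXP", b2), ("UnspentPP", b3), ("CurrentDevotion", b4), ("DevotionLevel", b5)]).modify "DevotionLevel" 0 (· + 1) = PySem.Dict.mk [("Level", b0), ("CurrentXP", b1), ("BlueBallsXP", b2), ("UnspentPP", b3), ("CurrentDevotion", b4), ("DevotionLevel", b5 + 1)] := by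
  apply PySem.Dict.ext
  simp [PySem.Dict.modify, PySem.Dict.items_insert, PySem.Dict.getD_eq_get?_getD, PySem.Dict.get?_mk_cons]

set_option maxHeartbeats 4000000 in
lemma pvStep (first : String) (t0 t1 t2 t3 t4 t5 : Int) (hb : 0 ≤ t0 ∧ 0 ≤ t1 ∧ 0 ≤ t2 ∧ 0 ≤ t3 ∧ 0 ≤ t4 ∧ 0 ≤ t5) :
    ∃ u0 u1 u2 u3 u4 u5, (0 ≤ u0 ∧ 0 ≤ u1 ∧ 0 ≤ u2 ∧ 0 ≤ u3 ∧ 0 ≤ u4 ∧ 0 ≤ u5) ∧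
      pvAInner first (pvC t0 t1 t2 t3 t4 t5) (pvK t0 t1 t2 t3 t4 t5) pvKEYWORDS = (pvC u0 u1 u2 u3 u4 u5, pvK u0 u1 u2 u3 u4 u5) ∧
      pvBInner first (pvB t0 t1 t2 t3 t4 t5) pvKEYWORDS = pvB u0 u1 u2 u3 u4 u5 := by
  obtain ⟨h0, h1, h2, h3, h4, h5⟩ := hb
  simp only [pvKEYWORDS, pvAInner, pvBInner, pvCharsLen]
  by_cases m0 : PySem.Str.isIn first "Level" = true
  · rw [if_pos m0, if_pos m0, pvKget0]
    by_cases hlt : t0 < 10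
    · rw [if_pos (by omega : min t0 10 < 10), (by omega : min t0 10 = t0)]
      refine ⟨t0 + 1, t1, t2, t3, t4, t5, by omega, ?_, ?_⟩
      · simp only [Prod.mk.injEq]
        constructor
        · unfold pvC
          rw [pvDmod t0 h0 hlt]
          unfold pvCnt
          simp only [pvInd_succ t0 hlt]
          apply congrArg PySem.Dict.mk
          simp only [List.cons.injEq, Prod.mk.injEq]
          repeat' apply And.intro
          all_goals first | trivial | ring
        · unfold pvK
          rw [pvDmodK0]
          apply congrArg PySem.Dict.mk
          simp only [List.cons.injEq, Prod.mk.injEq]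
          repeat' apply And.intro
          all_goals first | trivial | omega
      · unfold pvB
        rw [pvDmodK0]
    · rw [if_neg (by omega : ¬ min t0 10 < 10)]
      refine ⟨t0 + 1, t1, t2, t3, t4, t5, by omega, ?_, ?_⟩
      · simp only [pvC, pvK, pvCnt, pvInd]
        rw [(by omega : min (t0 + 1) (10 : Int) = min t0 10)]
      · unfold pvB
        rw [pvDmodK0]
  · rw [if_neg m0, if_neg m0]
    by_cases m1 : PySem.Str.isIn first "CurrentXP" = true
    · rw [if_pos m1, if_pos m1, pvKget1]
      by_cases hlt : t1 < 10
      · rw [if_pos (by omega : min t1 10 < 10), (by omega : min t1 10 = t1)]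
        refine ⟨t0, t1 + 1, t2, t3, t4, t5, by omega, ?_, ?_⟩
        · simp only [Prod.mk.injEq]
          constructor
          · unfold pvC
            rw [pvDmod t1 h1 hlt]
            unfold pvCnt
            simp only [pvInd_succ t1 hlt]
            apply congrArg PySem.Dict.mk
            simp only [List.cons.injEq, Prod.mk.injEq]
            repeat' apply And.intro
            all_goals first | trivial | ring
          · unfold pvK
            rw [pvDmodK1]
            apply congrArg PySem.Dict.mk
            simp only [List.cons.injEq, Prod.mk.injEq]
            repeat' apply And.intro
            all_goals first | trivial | omega
        · unfold pvB
          rw [pvDmodK1]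
      · rw [if_neg (by omega : ¬ min t1 10 < 10)]
        refine ⟨t0, t1 + 1, t2, t3, t4, t5, by omega, ?_, ?_⟩
        · simp only [pvC, pvK, pvCnt, pvInd]
          rw [(by omega : min (t1 + 1) (10 : Int) = min t1 10)]
        · unfold pvB
          rw [pvDmodK1]
    · rw [if_neg m1, if_neg m1]
      by_cases m2 : PySem.Str.isIn first "BlueBallsXP" = true
      · rw [if_pos m2, if_pos m2, pvKget2]
        by_cases hlt : t2 < 10
        · rw [if_pos (by omega : min t2 10 < 10), (by omega : min t2 10 = t2)]
          refine ⟨t0, t1, t2 + 1, t3, t4, t5, by omega, ?_, ?_⟩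
          · simp only [Prod.mk.injEq]
            constructor
            · unfold pvC
              rw [pvDmod t2 h2 hlt]
              unfold pvCnt
              simp only [pvInd_succ t2 hlt]
              apply congrArg PySem.Dict.mk
              simp only [List.cons.injEq, Prod.mk.injEq]
              repeat' apply And.intro
              all_goals first | trivial | ring
            · unfold pvK
              rw [pvDmodK2]
              apply congrArg PySem.Dict.mk
              simp only [List.cons.injEq, Prod.mk.injEq]
              repeat' apply And.intro
              all_goals first | trivial | omega
          · unfold pvB
            rw [pvDmodK2]
        · rw [if_neg (by omega : ¬ min t2 10 < 10)]
          refine ⟨t0, t1, t2 + 1, t3, t4, t5, by omega, ?_, ?_⟩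
          · simp only [pvC, pvK, pvCnt, pvInd]
            rw [(by omega : min (t2 + 1) (10 : Int) = min t2 10)]
          · unfold pvB
            rw [pvDmodK2]
      · rw [if_neg m2, if_neg m2]
        by_cases m3 : PySem.Str.isIn first "UnspentPP" = true
        · rw [if_pos m3, if_pos m3, pvKget3]
          by_cases hlt : t3 < 10
          · rw [if_pos (by omega : min t3 10 < 10), (by omega : min t3 10 = t3)]
            refine ⟨t0, t1, t2, t3 + 1, t4, t5, by omega, ?_, ?_⟩
            · simp only [Prod.mk.injEq]
              constructor
              · unfold pvC
                rw [pvDmod t3 h3 hlt]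
                unfold pvCnt
                simp only [pvInd_succ t3 hlt]
                apply congrArg PySem.Dict.mk
                simp only [List.cons.injEq, Prod.mk.injEq]
                repeat' apply And.intro
                all_goals first | trivial | ring
              · unfold pvK
                rw [pvDmodK3]
                apply congrArg PySem.Dict.mk
                simp only [List.cons.injEq, Prod.mk.injEq]
                repeat' apply And.intro
                all_goals first | trivial | omega
            · unfold pvB
              rw [pvDmodK3]
          · rw [if_neg (by omega : ¬ min t3 10 < 10)]
            refine ⟨t0, t1, t2, t3 + 1, t4, t5, by omega, ?_, ?_⟩
            · simp only [pvC, pvK, pvCnt, pvInd]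
              rw [(by omega : min (t3 + 1) (10 : Int) = min t3 10)]
            · unfold pvB
              rw [pvDmodK3]
        · rw [if_neg m3, if_neg m3]
          by_cases m4 : PySem.Str.isIn first "CurrentDevotion" = true
          · rw [if_pos m4, if_pos m4, pvKget4]
            by_cases hlt : t4 < 10
            · rw [if_pos (by omega : min t4 10 < 10), (by omega : min t4 10 = t4)]
              refine ⟨t0, t1, t2, t3, t4 + 1, t5, by omega, ?_, ?_⟩
              · simp only [Prod.mk.injEq]
                constructor
                · unfold pvC
                  rw [pvDmod t4 h4 hlt]
                  unfold pvCnt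
                  simp only [pvInd_succ t4 hlt]
                  apply congrArg PySem.Dict.mk
                  simp only [List.cons.injEq, Prod.mk.injEq]
                  repeat' apply And.intro
                  all_goals first | trivial | ring
                · unfold pvK
                  rw [pvDmodK4]
                  apply congrArg PySem.Dict.mk
                  simp only [List.cons.injEq, Prod.mk.injEq]
                  repeat' apply And.intro
                  all_goals first | trivial | omega
              · unfold pvB
                rw [pvDmodK4]
            · rw [if_neg (by omega : ¬ min t4 10 < 10)]
              refine ⟨t0, t1, t2, t3, t4 + 1, t5, by omega, ?_, ?_⟩
              · simp only [pvC, pvK, pvCnt, pvInd]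
                rw [(by omega : min (t4 + 1) (10 : Int) = min t4 10)]
              · unfold pvB
                rw [pvDmodK4]
          · rw [if_neg m4, if_neg m4]
            by_cases m5 : PySem.Str.isIn first "DevotionLevel" = true
            · rw [if_pos m5, if_pos m5, pvKget5]
              by_cases hlt : t5 < 10
              · rw [if_pos (by omega : min t5 10 < 10), (by omega : min t5 10 = t5)]
                refine ⟨t0, t1, t2, t3, t4, t5 + 1, by omega, ?_, ?_⟩
                · simp only [Prod.mk.injEq]
                  constructor
                  · unfold pvC
                    rw [pvDmod t5 h5 hlt]
                    unfold pvCnt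
                    simp only [pvInd_succ t5 hlt]
                    apply congrArg PySem.Dict.mk
                    simp only [List.cons.injEq, Prod.mk.injEq]
                    repeat' apply And.intro
                    all_goals first | trivial | ring
                  · unfold pvK
                    rw [pvDmodK5]
                    apply congrArg PySem.Dict.mk
                    simp only [List.cons.injEq, Prod.mk.injEq]
                    repeat' apply And.intro
                    all_goals first | trivial | omega
                · unfold pvB
                  rw [pvDmodK5]
              · rw [if_neg (by omega : ¬ min t5 10 < 10)]
                refine ⟨t0, t1, t2, t3, t4, t5 + 1, by omega, ?_, ?_⟩
                · simp only [pvC, pvK, pvCnt, pvInd]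
                  rw [(by omega : min (t5 + 1) (10 : Int) = min t5 10)]
                · unfold pvB
                  rw [pvDmodK5]
            · rw [if_neg m5, if_neg m5]
              exact ⟨t0, t1, t2, t3, t4, t5, ⟨h0, h1, h2, h3, h4, h5⟩, rfl, rfl⟩

lemma pvLoop (props : List (List (String × String))) :
    ∀ (t0 t1 t2 t3 t4 t5 : Int), (0 ≤ t0 ∧ 0 ≤ t1 ∧ 0 ≤ t2 ∧ 0 ≤ t3 ∧ 0 ≤ t4 ∧ 0 ≤ t5) →
    ∃ u0 u1 u2 u3 u4 u5, (0 ≤ u0 ∧ 0 ≤ u1 ∧ 0 ≤ u2 ∧ 0 ≤ u3 ∧ 0 ≤ u4 ∧ 0 ≤ u5) ∧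
      props.foldl (fun st prop => pvAInner (pvFirstOf prop) st.1 st.2 pvKEYWORDS) (pvC t0 t1 t2 t3 t4 t5, pvK t0 t1 t2 t3 t4 t5)
        = (pvC u0 u1 u2 u3 u4 u5, pvK u0 u1 u2 u3 u4 u5) ∧
      props.foldl (fun tallies prop => pvBInner (pvFirstOf prop) tallies pvKEYWORDS) (pvB t0 t1 t2 t3 t4 t5)
        = pvB u0 u1 u2 u3 u4 u5 := by
  induction props with
  | nil => exact fun t0 t1 t2 t3 t4 t5 hb => ⟨t0, t1, t2, t3, t4, t5, hb, rfl, rfl⟩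
  | cons p ps ih =>
    intro t0 t1 t2 t3 t4 t5 hb
    obtain ⟨u0, u1, u2, u3, u4, u5, hub, hA, hB⟩ := pvStep (pvFirstOf p) t0 t1 t2 t3 t4 t5 hb
    simp only [List.foldl_cons]
    rw [show (pvAInner (pvFirstOf p) (pvC t0 t1 t2 t3 t4 t5, pvK t0 t1 t2 t3 t4 t5).1 (pvC t0 t1 t2 t3 t4 t5, pvK t0 t1 t2 t3 t4 t5).2 pvKEYWORDS)
          = (pvC u0 u1 u2 u3 u4 u5, pvK u0 u1 u2 u3 u4 u5) from hA, hB]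
    exact ih u0 u1 u2 u3 u4 u5 hub

lemma pvInitC : PySem.Dict.mk (pvCHARACTERS.map (fun c => (c, (0 : Int)))) = pvC 0 0 0 0 0 0 := by decide

lemma pvInitK : PySem.Dict.mk (pvKEYWORDS.map (fun k => (k, (0 : Int)))) = pvK 0 0 0 0 0 0 := by decide

lemma pvInitB : PySem.Dict.mk (pvKEYWORDS.map (fun k => (k, (0 : Int)))) = pvB 0 0 0 0 0 0 := by decide

set_option maxHeartbeats 1000000 in
lemma pvCnt6 (i u0 u1 u2 u3 u4 u5 : Int) (hi : i < 10) :
    decide (6 ≤ pvCnt i u0 u1 u2 u3 u4 u5) = (decide (i < u0) && (decide (i < u1) && (decide (i < u2) && (decide (i < u3) && (decide (i < u4) && decide (i < u5)))))) := by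
  rw [Bool.eq_iff_iff]
  simp only [decide_eq_true_eq, Bool.and_eq_true]
  unfold pvCnt pvInd
  split_ifs <;> omega

lemma pvFinal (u0 u1 u2 u3 u4 u5 : Int) :
    pvCHARACTERS.map (fun c => (c, decide ((pvC u0 u1 u2 u3 u4 u5).getD c 0 ≥ (pvKEYWORDS.length : Int))))
      = (PySem.List.enumerate pvCHARACTERS 0).map
          (fun p => (p.2, decide (p.1 < (PySem.List.min? (pvB u0 u1 u2 u3 u4 u5).values (fun x => x)).getD 0))) := by
  rw [pvKeysLen]
  simp only [pvB, PySem.Dict.values_mk, List.map]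
  simp only [PySem.List.min?_id_cons]
  simp only [pvC, pvCHARACTERS, List.map, List.foldl, Option.getD,
             PySem.List.enumerate, PySem.Dict.getD_eq_get?_getD, PySem.Dict.get?_mk_cons]
  simp
  repeat' apply And.intro
  all_goals first
    | trivial
    | exact pvCnt6 _ u0 u1 u2 u3 u4 u5 (by norm_num)

-- ===== VERDICT (by name: the statement is the Claim_ definition above) =====
theorem get_unlocked_characters_spec : Claim_equal_get_unlocked_characters := by
  intro properties _ _
  unfold Spec_get_unlocked_characters
  simp only [get_unlocked_characters, get_unlocked_characters_alt]
  conv_lhs => rw [pvInitC, pvInitK]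
  conv_rhs => rw [pvInitB]
  obtain ⟨u0, u1, u2, u3, u4, u5, hub, hA, hB⟩ := pvLoop properties 0 0 0 0 0 0 (by omega)
  rw [hA, hB]
  dsimp only
  exact pvFinal u0 u1 u2 u3 u4 u5
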